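-- pv_equiv track=rewrite | github.com/ravi3011/addskils | week-6/code2.py | check
-- ===== SOURCE A (Python) =====
-- def check(x,k):
--     x.sort()
--     n = len(x)
--     x.append(0)
--
--     count = 0
--     i = 0
--     while(i < n):
--         j = i
--         while(x[j] - x[i] <= k and j < n):
--             j +=1
--         j -= 1
--         count +=1
--         i = j + 1
--         while(x[i] - x[j] <=k and i < n):
--             i+=1
--     return count
-- ===== SOURCE B (Python) =====
-- def check(x, k):
--     # One linear pass over the sorted list with a 3-state machine instead of
--     # A's index-jumping nested scans. Reproduces A's side effects (in-place
--     # sort + appended 0).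
--     x.sort()
--     n = len(x)
--     x.append(0)
--
--     count = 0
--     mode = 0      # 0: start a new group, 1: collecting a group, 2: skipping tail
--     reach = 0
--     last = 0
--     for v in x[:n]:
--         if mode == 1 and v > reach:
--             mode, reach = 2, last + k
--         if mode == 2 and v > reach:
--             mode = 0
--         if mode == 0:
--             count += 1
--             mode, reach = 1, v + k
--         if mode == 1:
--             last = v
--     return count
-- ===== Notes on version B (the rewrite author's own statement) =====
-- stated objective: alternative
-- what changed: B replaces A's index-jumping nested while-scans by one linear pass over the sorted list driven by a three-state machine (start-group / collecting / skipping), keeping the in-place sort and the appended 0.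
-- outside the precondition, e.g. on check([-1, -1, -1], -1): A returns 1, B returns 3; on check([0, -5], -1): A does not finish within the time limit, B returns 2
import Mathlib
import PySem

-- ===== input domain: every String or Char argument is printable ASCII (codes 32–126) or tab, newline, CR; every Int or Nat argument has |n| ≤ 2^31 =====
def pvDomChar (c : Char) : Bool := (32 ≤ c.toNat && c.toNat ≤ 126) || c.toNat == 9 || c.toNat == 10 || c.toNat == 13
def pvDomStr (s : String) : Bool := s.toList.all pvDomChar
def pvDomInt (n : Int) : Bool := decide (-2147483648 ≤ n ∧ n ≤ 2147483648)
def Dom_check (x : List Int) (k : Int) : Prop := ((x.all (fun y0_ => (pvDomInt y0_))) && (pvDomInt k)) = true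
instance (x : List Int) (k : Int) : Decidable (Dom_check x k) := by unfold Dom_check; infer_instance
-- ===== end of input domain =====

-- B replaces A's index-jumping nested scans by one linear pass with a 3-state
-- machine (objective: alternative algorithm, same result).  Both Pythons mutate
-- x in place (sort + append 0); the equivalence proved here is about the RETURN
-- value only (B performs the same mutation).

-- ===== PORT A =====
-- Both of A's inner while loops have the shape
--   'while x[idx] - base <= k and idx < n: idx += 1';
-- inside Pre_check every index stays in [0, n] (xs has length n+1 after the
-- appended 0), so List.getD is exact for Python's x[idx]; fuel n+1 bounds the
-- inner scans (idx never passes n) and the outer loop (i grows by ≥ 1 per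
-- iteration when k ≥ 0; the k < 0 divergence of the Python is outside Pre_check).
def checkScan (xs : List Int) (n : Nat) (k base : Int) : Nat → Nat → Nat
  | 0, j => j
  | f+1, j => if xs.getD j 0 - base ≤ k ∧ j < n then checkScan xs n k base f (j+1) else j

def checkLoop (xs : List Int) (n : Nat) (k : Int) : Nat → Int → Nat → Int
  | 0, count, _ => count
  | f+1, count, i =>
    if i < n then
      let j := checkScan xs n k (xs.getD i 0) (n+1) i - 1
      checkLoop xs n k f (count+1) (checkScan xs n k (xs.getD j 0) (n+1) (j+1))
    else count

def check (x : List Int) (k : Int) : Int :=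
  let xs := PySem.List.sorted x (fun a => a) false ++ [0]
  checkLoop xs x.length k (x.length + 1) 0 0

-- ===== PORT B =====
-- One iteration of Source B's for-body: the four ifs in order over the state
-- (count, mode, reach, last).
def stepB (k : Int) (st : Int × Nat × Int × Int) (v : Int) : Int × Nat × Int × Int :=
  let c := st.1; let m := st.2.1; let r := st.2.2.1; let l := st.2.2.2
  let p1 : Nat × Int := if m = 1 ∧ r < v then (2, l + k) else (m, r)
  let m1 := p1.1; let r1 := p1.2
  let m2 : Nat := if m1 = 2 ∧ r1 < v then 0 else m1
  let p3 : Int × Nat × Int := if m2 = 0 then (c + 1, 1, v + k) else (c, m2, r1)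
  let c3 := p3.1; let m3 := p3.2.1; let r3 := p3.2.2
  let l4 : Int := if m3 = 1 then v else l
  (c3, m3, r3, l4)

def check_alt (x : List Int) (k : Int) : Int :=
  let s := PySem.List.sorted x (fun a => a) false
  let n := s.length
  let xs := s ++ [0]
  ((xs.take n).foldl (stepB k) (0, 0, 0, 0)).1

-- ===== PRECONDITION & SPEC =====
-- Pre_check excludes k < 0 with nonempty x: there Python A in general never
-- returns (its last inner while cannot advance i, so the outer loop spins
-- forever), and on the few negative-k inputs where it does return it does so
-- only through the negative-index wraparound x[-1] hitting the appended 0, an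
-- accident of A's implementation no caller would specify.
def Pre_check (x : List Int) (k : Int) : Prop := 0 ≤ k ∨ x = []
instance (x : List Int) (k : Int) : Decidable (Pre_check x k) := by unfold Pre_check; infer_instance
def pvWitness_check : List Int × Int := ([7, 1, 4, 10], 3)

def Spec_check (x : List Int) (k : Int) (out : Int) : Prop := out = check_alt x k
instance (x : List Int) (k : Int) (out : Int) : Decidable (Spec_check x k out) := by unfold Spec_check; infer_instance

-- ===== CLAIM (what is proved, stated in full; the proofs are below) =====
def Claim_equal_check : Prop := ∀ (x : List Int) (k : Int), Dom_check x k → Pre_check x k → Spec_check x k (check x k)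

-- ===== LEMMAS AND PROOFS =====

-- Characterisation of A's inner scan.
theorem pv_scan_spec (xs : List Int) (n : Nat) (k base : Int) :
    ∀ f j, j ≤ n → n - j < f →
      j ≤ checkScan xs n k base f j ∧ checkScan xs n k base f j ≤ n ∧
      (∀ m, j ≤ m → m < checkScan xs n k base f j → xs.getD m 0 - base ≤ k) ∧
      (checkScan xs n k base f j < n → k < xs.getD (checkScan xs n k base f j) 0 - base) := by
  intro f
  induction f with
  | zero => intro j _ hf; omega
  | succ f ih =>
    intro j hj hf
    by_cases h : xs.getD j 0 - base ≤ k ∧ j < n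
    · have hrec := ih (j + 1) (by omega) (by omega)
      simp only [checkScan, if_pos h]
      refine ⟨by omega, hrec.2.1, ?_, hrec.2.2.2⟩
      intro m hm hm'
      rcases Nat.eq_or_lt_of_le hm with rfl | hlt
      · exact h.1
      · exact hrec.2.2.1 m hlt hm'
    · simp only [checkScan, if_neg h]
      refine ⟨le_refl _, hj, by omega, ?_⟩
      intro hjn
      rcases not_and_or.mp h with h1 | h2
      · omega
      · omega

-- Evaluations of one step of B's state machine.
theorem pv_stepB_start (k c r l v : Int) : stepB k (c, 0, r, l) v = (c + 1, 1, v + k, v) := by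
  simp [stepB]

theorem pv_stepB_collect (k c r l v : Int) (h : ¬ r < v) : stepB k (c, 1, r, l) v = (c, 1, r, v) := by
  simp [stepB, h]

theorem pv_stepB_skip (k c r l v : Int) (h : ¬ r < v) : stepB k (c, 2, r, l) v = (c, 2, r, l) := by
  simp [stepB, h]

theorem pv_stepB_break1 (k c r l v : Int) (h : r < v) : stepB k (c, 1, r, l) v = stepB k (c, 2, l + k, l) v := by
  simp [stepB, h]

theorem pv_stepB_new (k c r l v : Int) (h : r < v) : stepB k (c, 2, r, l) v = (c + 1, 1, v + k, v) := by
  simp [stepB, h]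

-- Collecting phase: all elements of [p, e) are within reach, so the fold just
-- advances, updating `last` to the element before the current position.
theorem pv_runCollect (s : List Int) (k : Int) :
    ∀ (d p : Nat) (c reach : Int), 1 ≤ p → p + d ≤ s.length →
      (∀ m, p ≤ m → m < p + d → s.getD m 0 ≤ reach) →
      (s.drop p).foldl (stepB k) (c, 1, reach, s.getD (p - 1) 0)
        = (s.drop (p + d)).foldl (stepB k) (c, 1, reach, s.getD (p + d - 1) 0) := by
  intro d
  induction d with
  | zero => intro p c reach _ _ _; rfl
  | succ d ih =>
    intro p c reach hp he hall
    have hlt : p < s.length := by omega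
    rw [List.drop_eq_getElem_cons hlt, List.foldl_cons,
        pv_stepB_collect k c reach _ _ (by
          have := hall p (le_refl p) (by omega)
          rw [List.getD_eq_getElem s 0 hlt] at this; omega)]
    have hsp : s[p] = s.getD ((p + 1) - 1) 0 :=
      (List.getD_eq_getElem s 0 (show p + 1 - 1 < s.length by omega)).symm
    rw [hsp, ih (p + 1) c reach (by omega) (by omega)
          (fun m hm hm' => hall m (by omega) (by omega))]
    have : p + 1 + d = p + (d + 1) := by omega
    rw [this]

-- Skipping phase: all elements of [p, e) are within reach, the state is frozen.
theorem pv_runSkip (s : List Int) (k : Int) :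
    ∀ (d p : Nat) (c reach last : Int), p + d ≤ s.length →
      (∀ m, p ≤ m → m < p + d → s.getD m 0 ≤ reach) →
      (s.drop p).foldl (stepB k) (c, 2, reach, last)
        = (s.drop (p + d)).foldl (stepB k) (c, 2, reach, last) := by
  intro d
  induction d with
  | zero => intro p c reach last _ _; rfl
  | succ d ih =>
    intro p c reach last he hall
    have hlt : p < s.length := by omega
    rw [List.drop_eq_getElem_cons hlt, List.foldl_cons,
        pv_stepB_skip k c reach last _ (by
          have := hall p (le_refl p) (by omega)
          rw [List.getD_eq_getElem s 0 hlt] at this; omega),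
        ih (p + 1) c reach last (by omega)
          (fun m hm hm' => hall m (by omega) (by omega))]
    have : p + 1 + d = p + (d + 1) := by omega
    rw [this]

-- At an element past the group's reach, mode 1 turns into mode 2 with the
-- group's last element setting the new reach.
theorem pv_conv12 (s : List Int) (k : Int) (e : Nat) (c reach last : Int)
    (hb : e < s.length → reach < s.getD e 0) :
    ((s.drop e).foldl (stepB k) (c, 1, reach, last)).1
      = ((s.drop e).foldl (stepB k) (c, 2, last + k, last)).1 := by
  by_cases he : e < s.length
  · rw [List.drop_eq_getElem_cons he, List.foldl_cons, List.foldl_cons,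
        pv_stepB_break1 k c reach last _ (by
          have := hb he
          rw [List.getD_eq_getElem s 0 he] at this; exact this)]
  · rw [List.drop_eq_nil_of_le (by omega)]; rfl

-- At an element past the skip reach, mode 2 behaves exactly like a fresh
-- mode-0 state (whatever reach/last that state carries).
theorem pv_conv20 (s : List Int) (k : Int) (e : Nat) (c reach last r' l' : Int)
    (hb : e < s.length → reach < s.getD e 0) :
    ((s.drop e).foldl (stepB k) (c, 2, reach, last)).1
      = ((s.drop e).foldl (stepB k) (c, 0, r', l')).1 := by
  by_cases he : e < s.length
  · rw [List.drop_eq_getElem_cons he, List.foldl_cons, List.foldl_cons,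
        pv_stepB_new k c reach last _ (by
          have := hb he
          rw [List.getD_eq_getElem s 0 he] at this; exact this),
        pv_stepB_start]
  · rw [List.drop_eq_nil_of_le (by omega)]; rfl

-- A's outer loop equals B's one-pass fold over the remaining suffix.
theorem pv_loop_fold (s : List Int) (k : Int) (hk : 0 ≤ k) :
    ∀ (f : Nat) (c : Int) (i : Nat), s.length - i < f →
      checkLoop (s ++ [0]) s.length k f c i
        = ((s.drop i).foldl (stepB k) (c, 0, 0, 0)).1 := by
  have hget : ∀ m, m < s.length → (s ++ [0]).getD m 0 = s.getD m 0 :=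
    fun m hm => List.getD_append _ _ _ _ hm
  intro f
  induction f with
  | zero => intro c i h; omega
  | succ f ih =>
    intro c i hf
    by_cases h : i < s.length
    · set xs := s ++ [0] with hxs
      set n := s.length with hn
      set base := xs.getD i 0 with hbase
      set e := checkScan xs n k base (n + 1) i with he
      obtain ⟨h1a, h1b, h1c, h1d⟩ := pv_scan_spec xs n k base (n + 1) i (by omega) (by omega)
      have he1 : i + 1 ≤ e := by
        have hstep : checkScan xs n k base (n + 1) i
            = checkScan xs n k base n (i + 1) := by
          show (if xs.getD i 0 - base ≤ k ∧ i < n then checkScan xs n k base n (i + 1) else i)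
            = checkScan xs n k base n (i + 1)
          rw [if_pos ⟨by omega, h⟩]
        have := (pv_scan_spec xs n k base n (i + 1) (by omega) (by omega)).1
        omega
      have hbase' : base = s.getD i 0 := hget i h
      set j := e - 1 with hj
      have hje : j + 1 = e := by omega
      have hjn : j < n := by omega
      set s' := checkScan xs n k (xs.getD j 0) (n + 1) (j + 1) with hs'
      obtain ⟨h2a, h2b, h2c, h2d⟩ :=
        pv_scan_spec xs n k (xs.getD j 0) (n + 1) (j + 1) (by omega) (by omega)
      -- A takes one outer step
      have hA : checkLoop xs n k (f + 1) c i = checkLoop xs n k f (c + 1) s' := by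
        show (if i < n then
                checkLoop xs n k f (c + 1)
                  (checkScan xs n k (xs.getD (checkScan xs n k base (n + 1) i - 1) 0) (n + 1)
                    (checkScan xs n k base (n + 1) i - 1 + 1))
              else c) = _
        rw [if_pos h, ← he]
      rw [hA, ih (c + 1) s' (by omega)]
      -- B's fold over drop i reaches the same count
      rw [List.drop_eq_getElem_cons h, List.foldl_cons, pv_stepB_start,
          ← List.getD_eq_getElem s 0 h, ← hbase']
      have hcol := pv_runCollect s k (e - (i + 1)) (i + 1) (c + 1) (base + k)
        (by omega) (by omega)
        (fun m hm hm' => by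
          have := h1c m (by omega) (by omega)
          rw [hget m (by omega)] at this; omega)
      have hiplus : i + 1 - 1 = i := by omega
      have heplus : i + 1 + (e - (i + 1)) = e := by omega
      rw [hiplus, heplus] at hcol
      rw [← hbase'] at hcol
      rw [hcol]
      have hlastj : e - 1 = j := rfl
      rw [hlastj]
      rw [pv_conv12 s k e (c + 1) (base + k) (s.getD j 0)
            (fun heL => by
              have := h1d (by omega)
              rw [hget e (by omega)] at this; omega)]
      have hbase2 : xs.getD j 0 = s.getD j 0 := hget j hjn
      have hskip := pv_runSkip s k (s' - e) e (c + 1) (s.getD j 0 + k) (s.getD j 0)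
        (by omega)
        (fun m hm hm' => by
          have := h2c m (by omega) (by omega)
          rw [hget m (by omega), hbase2] at this; omega)
      have hsplus : e + (s' - e) = s' := by omega
      rw [hsplus] at hskip
      rw [hskip]
      rw [pv_conv20 s k s' (c + 1) (s.getD j 0 + k) (s.getD j 0) 0 0
            (fun hsL => by
              have := h2d (by omega)
              rw [hget s' (by omega), hbase2] at this; omega)]
    · have hnil : s.drop i = [] := List.drop_eq_nil_of_le (by omega)
      show (if i < s.length then _ else c) = _
      rw [if_neg h, hnil]
      rfl

-- ===== VERDICT (by name: the statement is the Claim_ definition above) =====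
theorem check_spec : Claim_equal_check := by
  intro x k _ hpre
  unfold Spec_check check check_alt
  rcases hpre with hk | rfl
  · show checkLoop _ _ _ _ _ _
      = (((PySem.List.sorted x (fun a => a) false ++ [0]).take
            (PySem.List.sorted x (fun a => a) false).length).foldl (stepB k) (0, 0, 0, 0)).1
    set s := PySem.List.sorted x (fun a => a) false with hs
    have htake : (s ++ [0]).take s.length = s := by simp
    have hlen : x.length = s.length := (PySem.List.length_sorted x (fun a => a) false).symm
    rw [htake, hlen]
    have h := pv_loop_fold s k hk (s.length + 1) 0 0 (by omega)
    rw [List.drop_zero] at h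
    exact h
  · rfl
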